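-- pv_equiv track=rewrite | github.com/TheKingDavidF/all_stuff | NonDivisibleSubset.py | by_remainders
-- ===== SOURCE A (Python) =====
-- def div(k, num):
--     return num%k
--
-- def by_remainders(k, s):
--     rem_list = list(map(div, [k]*len(s), s))
--     counter = 0
--     if rem_list.count(0):
--         counter += 1
--     for rem in range(1, k//2+1):
--         if rem == k - rem:
--             if rem_list.count(rem):
--                 counter += 1
--         else:
--             if rem_list.count(rem) >= rem_list.count(k-rem):
--                 counter += rem_list.count(rem)
--             else:
--                 counter += rem_list.count(k - rem)
--     return counter
-- ===== SOURCE B (Python) =====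
-- def by_remainders(k, s):
--     # Complement counting: instead of adding, per residue pair, the larger count,
--     # start from len(s) and subtract what must be REMOVED: all but one multiple of k,
--     # all but one element with remainder k/2, and the smaller side of every
--     # complementary pair -- iterating over the remainders that actually occur.
--     cnt = {}
--     for n in s:
--         r = n % k
--         cnt[r] = cnt.get(r, 0) + 1
--     removed = 0
--     for r, c in cnt.items():
--         if r == 0 or 2 * r == k:
--             removed += c - 1
--         elif 2 * r < k:
--             removed += min(c, cnt.get(k - r, 0))
--         # remainders > k/2 are handled together with their partner k-r
--     return len(s) - removed
-- ===== Notes on version B (the rewrite author's own statement) =====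
-- stated objective: faster
-- what changed: Inverts the counting: instead of scanning every residue in range(1, k//2+1) and repeatedly calling rem_list.count to ADD the larger side of each pair, B builds a remainder-frequency dict in one pass and then SUBTRACTS from len(s) the elements that must be removed (the surplus at residues 0 and k/2 and the smaller side of each complementary pair), iterating only over the remainders that actually occur.
-- outside the precondition, e.g. on by_remainders(-4, [2, 6]): A returns 0, B returns 1; on by_remainders(-5, [1, 2, 3]): A returns 0, B returns 2; on by_remainders(0, []): A returns 0, B returns 0
import Mathlib
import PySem

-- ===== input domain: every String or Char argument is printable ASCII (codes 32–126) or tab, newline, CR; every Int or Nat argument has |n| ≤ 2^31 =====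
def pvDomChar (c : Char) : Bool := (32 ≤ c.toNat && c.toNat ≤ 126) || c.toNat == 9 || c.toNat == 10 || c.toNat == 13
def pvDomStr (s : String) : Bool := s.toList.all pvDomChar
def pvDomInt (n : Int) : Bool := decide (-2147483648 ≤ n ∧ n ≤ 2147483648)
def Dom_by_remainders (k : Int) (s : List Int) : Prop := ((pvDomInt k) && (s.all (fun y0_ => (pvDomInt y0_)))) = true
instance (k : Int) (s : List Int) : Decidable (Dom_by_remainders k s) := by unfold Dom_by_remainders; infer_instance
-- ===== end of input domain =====

-- B inverts A's counting: instead of scanning every residue in range(1, k//2+1) and adding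
-- the larger count of each complementary pair, it subtracts from len(s) the elements that
-- must be removed, iterating once over the remainders that actually occur.

-- ===== PORT A =====
-- map(div, [k]*len(s), s) applies div(k, num) = num % k to each num of s
def by_remainders (k : Int) (s : List Int) : Int :=
  let rem_list := s.map (fun num => PySem.Int.mod num k)
  let counter : Int := if rem_list.count 0 ≠ 0 then 1 else 0
  (PySem.List.pyRange 1 (PySem.Int.floordiv k 2 + 1) 1).foldl
    (fun counter rem =>
      if rem = k - rem then
        (if rem_list.count rem ≠ 0 then counter + 1 else counter)
      else if (rem_list.count rem : Int) ≥ (rem_list.count (k - rem) : Int) then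
        counter + (rem_list.count rem : Int)
      else
        counter + (rem_list.count (k - rem) : Int))
    counter

-- ===== PORT B =====
-- Source B: build the remainder-count dict in one pass over s, then one pass over its
-- items subtracting the removable elements from len(s)
def by_remainders_alt (k : Int) (s : List Int) : Int :=
  let cnt := s.foldl
    (fun d n => d.insert (PySem.Int.mod n k) (d.getD (PySem.Int.mod n k) 0 + 1))
    (PySem.Dict.empty : PySem.Dict Int Int)
  let removed := cnt.items.foldl
    (fun removed rc =>
      if rc.1 = 0 ∨ 2 * rc.1 = k then removed + (rc.2 - 1)
      else if 2 * rc.1 < k then removed + min rc.2 (cnt.getD (k - rc.1) 0)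
      else removed) 0
  (s.length : Int) - removed

-- ===== PRECONDITION & SPEC =====
-- Pre_ restricts to the problem's natural domain k ≥ 1: k = 0 makes num % k raise
-- ZeroDivisionError, and a negative divisor k is malformed input for this subset task
-- (both programs still return there, but no particular value is specified).
def Pre_by_remainders (k : Int) (_s : List Int) : Prop := 1 ≤ k
instance (k : Int) (s : List Int) : Decidable (Pre_by_remainders k s) := by
  unfold Pre_by_remainders; infer_instance

def pvWitness_by_remainders : Int × List Int := (6, [1, 2, 3, 7, 9, 12])

def Spec_by_remainders (k : Int) (s : List Int) (out : Int) : Prop := out = by_remainders_alt k s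
instance (k : Int) (s : List Int) (out : Int) : Decidable (Spec_by_remainders k s out) := by
  unfold Spec_by_remainders; infer_instance

-- ===== CLAIM (what is proved, stated in full; the proofs are below) =====
def Claim_equal_by_remainders : Prop := ∀ (k : Int) (s : List Int),
  Dom_by_remainders k s → Pre_by_remainders k s → Spec_by_remainders k s (by_remainders k s)

-- ===== LEMMAS AND PROOFS =====

-- A's per-residue contribution, and B's per-occurring-remainder removal
def gA (k : Int) (rl : List Int) (r : Int) : Int :=
  if 2 * r = k then (if r ∈ rl then 1 else 0)
  else max (rl.count r : Int) (rl.count (k - r) : Int)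

def fB (k : Int) (rl : List Int) (r : Int) : Int :=
  if r = 0 ∨ 2 * r = k then (rl.count r : Int) - 1
  else if 2 * r < k then min (rl.count r : Int) (rl.count (k - r) : Int)
  else 0

lemma A_sum (k : Int) (s : List Int) :
    by_remainders k s =
      (if 0 ∈ s.map (fun num => PySem.Int.mod num k) then 1 else 0) +
      ((PySem.List.pyRange 1 (PySem.Int.floordiv k 2 + 1) 1).map
        (gA k (s.map (fun num => PySem.Int.mod num k)))).sum := by
  unfold by_remainders
  dsimp only
  set rl := s.map (fun num => PySem.Int.mod num k) with hrl
  have hbody : (fun (counter rem : Int) =>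
      if rem = k - rem then
        (if rl.count rem ≠ 0 then counter + 1 else counter)
      else if (rl.count rem : Int) ≥ (rl.count (k - rem) : Int) then
        counter + (rl.count rem : Int)
      else counter + (rl.count (k - rem) : Int))
      = (fun counter rem => counter + gA k rl rem) := by
    funext c r
    unfold gA
    by_cases h1 : r = k - r
    · have h2 : 2 * r = k := by omega
      rw [if_pos h1, if_pos h2]
      by_cases hm : r ∈ rl
      · rw [if_pos hm, if_pos (by simpa [List.count_eq_zero] using hm)]
      · rw [if_neg hm, if_neg (by simpa [List.count_eq_zero] using hm), add_zero]
    · have h2 : ¬ 2 * r = k := by omega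
      rw [if_neg h1, if_neg h2]
      by_cases hge : (rl.count r : Int) ≥ (rl.count (k - r) : Int)
      · rw [if_pos hge, max_eq_left hge]
      · rw [if_neg hge, max_eq_right (by omega)]
  rw [hbody, PySem.List.foldl_add]
  congr 1
  by_cases h0 : (0 : Int) ∈ rl
  · rw [if_pos h0, if_pos (by simpa [List.count_eq_zero] using h0)]
  · rw [if_neg h0, if_neg (by simpa [List.count_eq_zero] using h0)]
lemma B_sum (k : Int) (s : List Int) :
    by_remainders_alt k s =
      (s.length : Int) -
      ((PySem.Set.ofList (s.map (fun num => PySem.Int.mod num k))).map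
        (fB k (s.map (fun num => PySem.Int.mod num k)))).sum := by
  unfold by_remainders_alt
  dsimp only
  set rl := s.map (fun num => PySem.Int.mod num k) with hrl
  have hcnt : s.foldl
      (fun d n => d.insert (PySem.Int.mod n k) (d.getD (PySem.Int.mod n k) 0 + 1))
      (PySem.Dict.empty : PySem.Dict Int Int) = PySem.Dict.counter rl := by
    rw [← PySem.Dict.foldl_insert_getD_add_one_eq_counter, hrl, List.foldl_map]
  rw [hcnt, PySem.Dict.items_counter, List.foldl_map]
  have hbody : (fun (removed : Int) (r : Int) =>
      if (r, (rl.count r : Int)).1 = 0 ∨ 2 * (r, (rl.count r : Int)).1 = k then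
        removed + ((r, (rl.count r : Int)).2 - 1)
      else if 2 * (r, (rl.count r : Int)).1 < k then
        removed + min (r, (rl.count r : Int)).2 ((PySem.Dict.counter rl).getD (k - (r, (rl.count r : Int)).1) 0)
      else removed)
      = (fun removed r => removed + fB k rl r) := by
    funext acc r
    unfold fB
    simp only [PySem.Dict.getD_counter]
    split_ifs <;> simp
  rw [hbody, PySem.List.foldl_add, zero_add]
lemma main_identity (k : Int) (rl : List Int) (hk : 1 ≤ k)
    (hdom : ∀ r ∈ rl, 0 ≤ r ∧ r < k) :
    (if 0 ∈ rl then 1 else 0) +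
      ((PySem.List.pyRange 1 (PySem.Int.floordiv k 2 + 1) 1).map (gA k rl)).sum =
    (rl.length : Int) - ((PySem.Set.ofList rl).map (fB k rl)).sum := by
  set m := PySem.Int.floordiv k 2 with hm
  have hm2 : m * 2 ≤ k := (PySem.Int.le_floordiv_iff_mul_le (by norm_num)).mp (le_refl m)
  have hmk : k < (m + 1) * 2 := (PySem.Int.floordiv_lt_iff_lt_mul (by norm_num)).mp (by omega)
  have hmemT : ∀ r : Int, r ∈ rl.toFinset ↔ r ∈ rl := fun r => List.mem_toFinset
  -- list sums to Finset sums
  have hT : ((PySem.Set.ofList rl).map (fB k rl)).sum = ∑ r ∈ rl.toFinset, fB k rl r := by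
    rw [← List.sum_toFinset _ (PySem.Set.nodup_ofList rl)]
    congr 1
    apply Finset.ext; intro x
    simp [List.mem_toFinset, PySem.Set.mem_ofList]
  have hR : ((PySem.List.pyRange 1 (m + 1) 1).map (gA k rl)).sum
      = ∑ r ∈ Finset.Icc 1 m, gA k rl r := by
    rw [← List.sum_toFinset _ (PySem.List.nodup_pyRange_one 1 (m + 1))]
    congr 1
    apply Finset.ext; intro x
    simp only [List.mem_toFinset, PySem.List.mem_pyRange_one, Finset.mem_Icc]
    omega
  have hlen : (rl.length : Int) = ∑ r ∈ rl.toFinset, (rl.count r : Int) := by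
    rw [← List.sum_toFinset_count_eq_length rl]
    push_cast
    rfl
  rw [hT, hR, hlen, ← Finset.sum_sub_distrib]
  -- split the occurring remainders into residue 0, the middle residue, low and high
  rw [← Finset.sum_filter_add_sum_filter_not rl.toFinset (fun r => r = 0)]
  rw [← Finset.sum_filter_add_sum_filter_not (rl.toFinset.filter (fun r => ¬ r = 0))
      (fun r => 2 * r = k)]
  rw [← Finset.sum_filter_add_sum_filter_not
      ((rl.toFinset.filter (fun r => ¬ r = 0)).filter (fun r => ¬ 2 * r = k))
      (fun r => 2 * r < k)]
  -- split the scanned range at the middle residue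
  rw [← Finset.sum_filter_add_sum_filter_not (Finset.Icc 1 m) (fun r => 2 * r = k)]
  -- residue 0 contributes 1 iff it occurs
  have h0 : ∑ r ∈ rl.toFinset.filter (fun r => r = 0), ((rl.count r : Int) - fB k rl r)
      = (if 0 ∈ rl then 1 else 0) := by
    rw [Finset.filter_eq']
    by_cases h : (0 : Int) ∈ rl
    · rw [if_pos ((hmemT 0).mpr h), Finset.sum_singleton, if_pos h]
      unfold fB
      rw [if_pos (Or.inl rfl)]
      ring
    · rw [if_neg (fun hc => h ((hmemT 0).mp hc)), Finset.sum_empty, if_neg h]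
  -- the middle residue k/2 (k even) contributes 1 iff it occurs, on both sides
  have hmid : ∑ r ∈ (Finset.Icc 1 m).filter (fun r => 2 * r = k), gA k rl r
      = ∑ r ∈ (rl.toFinset.filter (fun r => ¬ r = 0)).filter (fun r => 2 * r = k),
          ((rl.count r : Int) - fB k rl r) := by
    by_cases hk2 : 2 * m = k
    · have hfl : (rl.toFinset.filter (fun r => ¬ r = 0)).filter (fun r => 2 * r = k)
          = rl.toFinset.filter (fun r => r = m) := by
        apply Finset.ext; intro x
        simp only [Finset.mem_filter]
        constructor
        · rintro ⟨⟨hx, _⟩, h2⟩; exact ⟨hx, by omega⟩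
        · rintro ⟨hx, rfl⟩; exact ⟨⟨hx, by omega⟩, by omega⟩
      have hfr : (Finset.Icc 1 m).filter (fun r => 2 * r = k) = {m} := by
        apply Finset.ext; intro x
        simp only [Finset.mem_filter, Finset.mem_Icc, Finset.mem_singleton]
        omega
      rw [hfl, hfr, Finset.filter_eq', Finset.sum_singleton]
      unfold gA
      rw [if_pos hk2]
      by_cases h : m ∈ rl
      · rw [if_pos h, if_pos ((hmemT m).mpr h), Finset.sum_singleton]
        unfold fB
        rw [if_pos (Or.inr hk2)]
        ring
      · rw [if_neg h, if_neg (fun hc => h ((hmemT m).mp hc)), Finset.sum_empty]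
    · have hfl : (rl.toFinset.filter (fun r => ¬ r = 0)).filter (fun r => 2 * r = k) = ∅ := by
        apply Finset.filter_false_of_mem
        intro x hx
        omega
      have hfr : (Finset.Icc 1 m).filter (fun r => 2 * r = k) = ∅ := by
        apply Finset.filter_false_of_mem
        intro x hx
        simp only [Finset.mem_Icc] at hx
        omega
      rw [hfl, hfr, Finset.sum_empty, Finset.sum_empty]
  -- the low range: each pair's maximum = kept low part + kept high part
  have hlowhigh : ∑ r ∈ (Finset.Icc 1 m).filter (fun r => ¬ 2 * r = k), gA k rl r
      = ∑ r ∈ ((rl.toFinset.filter (fun r => ¬ r = 0)).filter (fun r => ¬ 2 * r = k)).filter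
            (fun r => 2 * r < k), ((rl.count r : Int) - fB k rl r)
        + ∑ r ∈ ((rl.toFinset.filter (fun r => ¬ r = 0)).filter (fun r => ¬ 2 * r = k)).filter
            (fun r => ¬ 2 * r < k), ((rl.count r : Int) - fB k rl r) := by
    set Rlow := (Finset.Icc 1 m).filter (fun r => ¬ 2 * r = k) with hRlowdef
    have hmemRlow : ∀ r : Int, r ∈ Rlow ↔ 1 ≤ r ∧ 2 * r < k := by
      intro r
      rw [hRlowdef]
      simp only [Finset.mem_filter, Finset.mem_Icc]
      omega
    set T3 := ((rl.toFinset.filter (fun r => ¬ r = 0)).filter (fun r => ¬ 2 * r = k)).filter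
        (fun r => 2 * r < k) with hT3def
    set T4 := ((rl.toFinset.filter (fun r => ¬ r = 0)).filter (fun r => ¬ 2 * r = k)).filter
        (fun r => ¬ 2 * r < k) with hT4def
    have hmemT3 : ∀ r : Int, r ∈ T3 ↔ r ∈ rl ∧ ¬ r = 0 ∧ 2 * r < k := by
      intro r
      rw [hT3def]
      simp only [Finset.mem_filter, List.mem_toFinset]
      constructor
      · rintro ⟨⟨⟨h1, h2⟩, h3⟩, h4⟩; exact ⟨h1, h2, h4⟩
      · rintro ⟨h1, h2, h3⟩; exact ⟨⟨⟨h1, h2⟩, by omega⟩, h3⟩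
    have hmemT4 : ∀ r : Int, r ∈ T4 ↔ r ∈ rl ∧ 2 * r > k := by
      intro r
      rw [hT4def]
      simp only [Finset.mem_filter, List.mem_toFinset]
      constructor
      · rintro ⟨⟨⟨h1, h2⟩, h3⟩, h4⟩; exact ⟨h1, by omega⟩
      · rintro ⟨h1, h2⟩; exact ⟨⟨⟨h1, by omega⟩, by omega⟩, by omega⟩
    -- pointwise: max a b = (a - min a b) + b
    have hsplit : ∑ r ∈ Rlow, gA k rl r
        = ∑ r ∈ Rlow, ((rl.count r : Int) - min (rl.count r : Int) (rl.count (k - r) : Int))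
          + ∑ r ∈ Rlow, (rl.count (k - r) : Int) := by
      rw [← Finset.sum_add_distrib]
      apply Finset.sum_congr rfl
      intro r hr
      have hrm := (hmemRlow r).mp hr
      unfold gA
      rw [if_neg (by omega)]
      omega
    -- low side: extend T3 to Rlow (absent low residues contribute 0)
    have hlow : ∑ r ∈ T3, ((rl.count r : Int) - fB k rl r)
        = ∑ r ∈ Rlow, ((rl.count r : Int) - min (rl.count r : Int) (rl.count (k - r) : Int)) := by
      have hcg : ∑ r ∈ T3, ((rl.count r : Int) - fB k rl r)
          = ∑ r ∈ T3, ((rl.count r : Int) - min (rl.count r : Int) (rl.count (k - r) : Int)) := by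
        apply Finset.sum_congr rfl
        intro r hr
        have hrm := (hmemT3 r).mp hr
        unfold fB
        rw [if_neg (by omega), if_pos (by omega)]
      rw [hcg]
      apply Finset.sum_subset
      · intro r hr
        have hrm := (hmemT3 r).mp hr
        have := hdom r hrm.1
        exact (hmemRlow r).mpr ⟨by omega, by omega⟩
      · intro r hr hnr
        have hrm := (hmemRlow r).mp hr
        have hc : (rl.count r : Int) = 0 := by
          have : r ∉ rl := fun hmem => hnr ((hmemT3 r).mpr ⟨hmem, by omega, by omega⟩)
          simp [List.count_eq_zero.mpr this]
        have hnn : (0 : Int) ≤ (rl.count (k - r) : Int) := Int.natCast_nonneg _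
        omega
    -- high side: reflect the low range onto the high residues
    have himg : ∑ r ∈ Rlow, (rl.count (k - r) : Int)
        = ∑ r ∈ Rlow.image (fun r => k - r), (rl.count r : Int) := by
      rw [Finset.sum_image]
      intro x hx y hy hxy
      have hxy' : k - x = k - y := hxy
      omega
    have hhigh : ∑ r ∈ T4, ((rl.count r : Int) - fB k rl r)
        = ∑ r ∈ Rlow.image (fun r => k - r), (rl.count r : Int) := by
      have hcg : ∑ r ∈ T4, ((rl.count r : Int) - fB k rl r)
          = ∑ r ∈ T4, (rl.count r : Int) := by
        apply Finset.sum_congr rfl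
        intro r hr
        have hrm := (hmemT4 r).mp hr
        unfold fB
        rw [if_neg (by omega), if_neg (by omega)]
        ring
      rw [hcg]
      apply Finset.sum_subset
      · intro r hr
        have hrm := (hmemT4 r).mp hr
        have := hdom r hrm.1
        exact Finset.mem_image.mpr ⟨k - r, (hmemRlow (k - r)).mpr ⟨by omega, by omega⟩, by ring⟩
      · intro r hr hnr
        rcases Finset.mem_image.mp hr with ⟨r0, hr0, rfl⟩
        have hrm := (hmemRlow r0).mp hr0
        have : (k - r0) ∉ rl := fun hmem => hnr ((hmemT4 (k - r0)).mpr ⟨hmem, by omega⟩)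
        simp [List.count_eq_zero.mpr this]
    rw [hsplit, hlow, hhigh, himg]
  rw [h0, hmid, hlowhigh]
-- ===== VERDICT (by name: the statement is the Claim_ definition above) =====
theorem by_remainders_spec : Claim_equal_by_remainders := by
  intro k s _ hk
  unfold Pre_by_remainders at hk
  unfold Spec_by_remainders
  rw [A_sum, B_sum]
  have hdom : ∀ r ∈ s.map (fun num => PySem.Int.mod num k), 0 ≤ r ∧ r < k := by
    intro r hr
    rcases List.mem_map.mp hr with ⟨n, _, rfl⟩
    exact ⟨PySem.Int.mod_nonneg n (by omega), PySem.Int.mod_lt n (by omega)⟩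
  have := main_identity k (s.map (fun num => PySem.Int.mod num k)) hk hdom
  rw [List.length_map] at this
  exact this
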